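-- pv_equiv track=rewrite | github.com/olimiemma/ARC-Prize-2025-Kaggle-ARC-AGI-2-Benchmark- | arc_prize_2025_submission/kaggle_arc_solver_v3.py | infer_bijective_palette_map
-- ===== SOURCE A (Python) =====
-- from typing import Any, Dict, List, Tuple, Optional
--
-- Grid = List[List[int]]
--
-- PaletteMap = Dict[int, int]
--
-- def dims(g: Grid) -> Tuple[int, int]:
--     return (len(g), len(g[0]) if g else 0)
--
-- def infer_bijective_palette_map(src: Grid, dst: Grid) -> Optional[PaletteMap]:
--     if dims(src) != dims(dst):
--         return None
--     mapping: Dict[int,int] = {}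
--     inverse: Dict[int,int] = {}
--     h, w = dims(src)
--     for r in range(h):
--         for c in range(w):
--             s, d = src[r][c], dst[r][c]
--             if s in mapping and mapping[s] != d:
--                 return None
--             if d in inverse and inverse[d] != s:
--                 return None
--             mapping[s] = d
--             inverse[d] = s
--     return mapping
-- ===== SOURCE B (Python) =====
-- def infer_bijective_palette_map(src, dst):
--     def dims(g):
--         return (len(g), len(g[0]) if g else 0)
--     if dims(src) != dims(dst):
--         return None
--     h, w = dims(src)
--     pairs = []
--     seen = set()
--     for r in range(h):
--         for c in range(w):
--             p = (src[r][c], dst[r][c])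
--             if p not in seen:
--                 seen.add(p)
--                 pairs.append(p)
--     if len({p[0] for p in pairs}) != len(pairs) or len({p[1] for p in pairs}) != len(pairs):
--         return None
--     return dict(pairs)
-- ===== Notes on version B (the rewrite author's own statement) =====
-- stated objective: alternative
-- what changed: A incrementally maintains forward and inverse dicts and returns None at the first conflicting cell; B collects the set of distinct (src,dst) cell pairs in one sweep and then decides bijectivity by comparing the cardinalities of the pair set's two projections with its size, returning dict(pairs).
-- outside the precondition, e.g. on infer_bijective_palette_map([[1, 1], [2]], [[1, 2], [3]]): A returns None, B raises IndexError
import Mathlib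
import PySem

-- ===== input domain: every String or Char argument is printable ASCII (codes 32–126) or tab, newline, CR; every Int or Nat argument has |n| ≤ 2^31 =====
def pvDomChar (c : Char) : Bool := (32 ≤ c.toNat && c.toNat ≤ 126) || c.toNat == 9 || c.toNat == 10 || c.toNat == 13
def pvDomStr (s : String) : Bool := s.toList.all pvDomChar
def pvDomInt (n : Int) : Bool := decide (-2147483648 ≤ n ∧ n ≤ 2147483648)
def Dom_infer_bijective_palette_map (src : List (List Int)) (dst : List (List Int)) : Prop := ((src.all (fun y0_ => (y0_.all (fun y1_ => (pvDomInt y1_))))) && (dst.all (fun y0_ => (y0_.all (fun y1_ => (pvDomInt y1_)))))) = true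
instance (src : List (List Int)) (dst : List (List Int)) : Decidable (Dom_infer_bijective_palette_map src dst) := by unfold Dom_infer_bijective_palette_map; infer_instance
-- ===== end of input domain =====

-- B replaces A's incremental two-dict consistency check (early return on first conflict) by one
-- sweep collecting the distinct (src,dst) cell pairs and a final bijectivity test on the
-- projections' cardinalities; same asymptotic cost (objective: alternative).

-- ===== PORT A =====
-- dims(g) = (len(g), len(g[0]) if g else 0)
def pvDims (g : List (List Int)) : Int × Int :=
  ((g.length : Int), match g with | [] => 0 | r :: _ => (r.length : Int))

-- src[r][c]; total via defaults — Pre_ guarantees the indices are in range (no IndexError)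
def pvCell (g : List (List Int)) (r c : Int) : Int :=
  PySem.List.pyGetD (PySem.List.pyGetD g r []) c 0

-- body of A's loop on one cell pair (s,d); state none = early 'return None'
def pvGo (st : Option (PySem.Dict Int Int × PySem.Dict Int Int)) (p : Int × Int) :
    Option (PySem.Dict Int Int × PySem.Dict Int Int) :=
  match st with
  | none => none
  | some (m, inv) =>
    if m.contains p.1 ∧ m.getD p.1 0 ≠ p.2 then none
    else if inv.contains p.2 ∧ inv.getD p.2 0 ≠ p.1 then none
    else some (m.insert p.1 p.2, inv.insert p.2 p.1)

def infer_bijective_palette_map (src : List (List Int)) (dst : List (List Int)) :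
    Option (List (Int × Int)) :=
  if pvDims src ≠ pvDims dst then none
  else
    let h := (pvDims src).1
    let w := (pvDims src).2
    match (PySem.List.pyRange 0 h 1).foldl
        (fun st r => (PySem.List.pyRange 0 w 1).foldl
          (fun st c => pvGo st (pvCell src r c, pvCell dst r c)) st)
        (some (PySem.Dict.empty, PySem.Dict.empty)) with
    | none => none
    | some (m, _) => some m.items

-- ===== PORT B =====
def infer_bijective_palette_map_alt (src : List (List Int)) (dst : List (List Int)) :
    Option (List (Int × Int)) :=
  if pvDims src ≠ pvDims dst then none
  else
    let h := (pvDims src).1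
    let w := (pvDims src).2
    -- pairs list + seen set of Source B = PySem.Set built by add
    let pairs : PySem.Set (Int × Int) :=
      (PySem.List.pyRange 0 h 1).foldl
        (fun S r => (PySem.List.pyRange 0 w 1).foldl
          (fun S c => PySem.Set.add S (pvCell src r c, pvCell dst r c)) S)
        PySem.Set.empty
    if (PySem.Set.ofList (pairs.map Prod.fst)).length ≠ pairs.length ∨
       (PySem.Set.ofList (pairs.map Prod.snd)).length ≠ pairs.length then none
    else some (PySem.Dict.ofList pairs).items

-- ===== PRECONDITION & SPEC =====
-- Pre_ excludes ragged grids (a row shorter than len(src[0]) while dims(src)==dims(dst)):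
-- there the Python A raises IndexError, except when an earlier palette conflict makes A
-- return None first — B scans all cells and raises there, so those inputs are excluded too.
def Pre_infer_bijective_palette_map (src : List (List Int)) (dst : List (List Int)) : Prop :=
  pvDims src ≠ pvDims dst ∨
    ((∀ row ∈ src, (pvDims src).2 ≤ (row.length : Int)) ∧
     (∀ row ∈ dst, (pvDims src).2 ≤ (row.length : Int)))
instance (src : List (List Int)) (dst : List (List Int)) :
    Decidable (Pre_infer_bijective_palette_map src dst) := by
  unfold Pre_infer_bijective_palette_map; infer_instance

def pvWitness_infer_bijective_palette_map : List (List Int) × List (List Int) :=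
  ([[1, 2], [3, 4]], [[5, 6], [7, 8]])

def Spec_infer_bijective_palette_map (src : List (List Int)) (dst : List (List Int))
    (out : Option (List (Int × Int))) : Prop := out = infer_bijective_palette_map_alt src dst
instance (src : List (List Int)) (dst : List (List Int)) (out : Option (List (Int × Int))) :
    Decidable (Spec_infer_bijective_palette_map src dst out) := by
  unfold Spec_infer_bijective_palette_map; infer_instance

-- ===== CLAIM (what is proved, stated in full; the proofs are below) =====
def Claim_equal_infer_bijective_palette_map : Prop := ∀ (src : List (List Int)) (dst : List (List Int)), Dom_infer_bijective_palette_map src dst → Pre_infer_bijective_palette_map src dst → Spec_infer_bijective_palette_map src dst (infer_bijective_palette_map src dst)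

-- ===== LEMMAS AND PROOFS =====

-- nested fold = fold over the flattened cell list
theorem pvFoldlFoldlFlatMap {α β σ : Type} (l : List α) (inner : α → List β)
    (g : σ → β → σ) (init : σ) :
    l.foldl (fun st r => (inner r).foldl g st) init = (l.flatMap inner).foldl g init := by
  induction l generalizing init with
  | nil => rfl
  | cons a t ih => simp [List.foldl_append, ih]

def pvCells (src dst : List (List Int)) (h w : Int) : List (Int × Int) :=
  (PySem.List.pyRange 0 h 1).flatMap
    (fun r => (PySem.List.pyRange 0 w 1).map (fun c => (pvCell src r c, pvCell dst r c)))

theorem pvGo_none (ps : List (Int × Int)) : ps.foldl pvGo none = none := by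
  induction ps with
  | nil => rfl
  | cons p t ih => simpa [pvGo] using ih

theorem pvKeyUnique {S : List (Int × Int)} (h : (S.map Prod.fst).Nodup)
    {s d d' : Int} (h1 : (s, d) ∈ S) (h2 : (s, d') ∈ S) : d = d' := by
  have := List.inj_on_of_nodup_map h h1 h2 rfl
  exact congrArg Prod.snd this

theorem pvAdd_prefix (ps : List (Int × Int)) (S : PySem.Set (Int × Int)) :
    S <+: ps.foldl PySem.Set.add S := by
  induction ps generalizing S with
  | nil => exact List.prefix_rfl
  | cons p t ih =>
    refine List.IsPrefix.trans ?_ (ih (PySem.Set.add S p))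
    simp only [PySem.Set.add]
    split
    · exact List.prefix_rfl
    · exact List.prefix_append S [p]

theorem pvFoldlAddLen {α : Type} [BEq α] [LawfulBEq α] (xs : List α) (s : List α) :
    (xs.foldl PySem.Set.add s).length ≤ s.length + xs.length := by
  induction xs generalizing s with
  | nil => simp
  | cons x t ih =>
    refine le_trans (ih (PySem.Set.add s x)) ?_
    have : (PySem.Set.add s x).length ≤ s.length + 1 := by
      simp only [PySem.Set.add]
      split
      · omega
      · simp
    simp only [List.length_cons]
    omega

-- length of the accumulated set equals total length iff there were no duplicates
theorem pvFoldlAddLenIff {α : Type} [BEq α] [LawfulBEq α] (xs : List α) (s : List α)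
    (hs : s.Nodup) :
    (xs.foldl PySem.Set.add s).length = s.length + xs.length ↔ (s ++ xs).Nodup := by
  induction xs generalizing s with
  | nil => simp [hs]
  | cons x t ih =>
    by_cases hx : x ∈ s
    · have hc : PySem.Set.add s x = s := by
        simp [PySem.Set.add, PySem.Set.contains, hx]
      rw [List.foldl_cons, hc]
      constructor
      · intro hlen
        exfalso
        have := pvFoldlAddLen t s
        simp only [List.length_cons] at hlen
        omega
      · intro hn
        exfalso
        obtain ⟨-, -, hdis⟩ := List.nodup_append.mp hn
        exact hdis x hx x (List.mem_cons_self ..) rfl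
    · have hc : PySem.Set.add s x = s ++ [x] := by
        simp [PySem.Set.add, PySem.Set.contains, hx]
      rw [List.foldl_cons, hc]
      have hs' : (s ++ [x]).Nodup := by
        simp [List.nodup_append, hs]
        intro a ha rfl
        exact hx ha
      have heq : s ++ [x] ++ t = s ++ x :: t := by simp
      rw [show (s.length + (x :: t).length) = (s ++ [x]).length + t.length by simp; omega,
        ih (s ++ [x]) hs', heq]

def pvSwap (p : Int × Int) : Int × Int := (p.2, p.1)

theorem pvSwap_fst (S : List (Int × Int)) : (S.map pvSwap).map Prod.fst = S.map Prod.snd := by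
  rw [List.map_map]; rfl

theorem pvKeys_mk (l : List (Int × Int)) : (PySem.Dict.mk l).keys = l.map Prod.fst := by
  simp [PySem.Dict.keys]

theorem pvContains_mk (l : List (Int × Int)) (k : Int) :
    (PySem.Dict.mk l).contains k = true ↔ k ∈ l.map Prod.fst := by
  rw [PySem.Dict.contains_iff_mem_keys, pvKeys_mk]

theorem pvContains_mk_false (l : List (Int × Int)) (k : Int) (h : k ∉ l.map Prod.fst) :
    (PySem.Dict.mk l).contains k = false := by
  cases hc : (PySem.Dict.mk l).contains k
  · rfl
  · exact absurd ((pvContains_mk l k).mp hc) h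

theorem pvGetD_mk {l : List (Int × Int)} {k v : Int} (h : (k, v) ∈ l)
    (hn : (l.map Prod.fst).Nodup) : (PySem.Dict.mk l).getD k 0 = v :=
  PySem.Dict.getD_of_mem_items (PySem.Dict.mk l) h (by rw [pvKeys_mk]; exact hn) 0

theorem pvInsert_mem {l : List (Int × Int)} (hf : (l.map Prod.fst).Nodup)
    {p : Int × Int} (hp : p ∈ l) :
    (PySem.Dict.mk l).insert p.1 p.2 = PySem.Dict.mk l := by
  apply PySem.Dict.ext
  rw [PySem.Dict.items_insert_of_contains (PySem.Dict.mk l) p.2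
    ((pvContains_mk l p.1).mpr (List.mem_map.mpr ⟨p, hp, rfl⟩))]
  show l.map (fun q => if q.1 == p.1 then (p.1, p.2) else q) = l
  have : ∀ q ∈ l, (fun q => if q.1 == p.1 then (p.1, p.2) else q) q = id q := by
    intro q hq
    simp only [id]
    split
    · next hqp =>
      have hqp : q.1 = p.1 := by simpa using hqp
      have : q.2 = p.2 := pvKeyUnique hf (hqp ▸ hq) hp
      rw [← hqp, ← this]
    · rfl
  rw [List.map_congr_left this, List.map_id]

theorem pvInsert_fresh (l : List (Int × Int)) (p : Int × Int)
    (h : p.1 ∉ l.map Prod.fst) :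
    (PySem.Dict.mk l).insert p.1 p.2 = PySem.Dict.mk (l ++ [p]) := by
  apply PySem.Dict.ext
  rw [PySem.Dict.items_insert_of_not_contains (PySem.Dict.mk l) p.2 (pvContains_mk_false l p.1 h)]

-- A's loop invariant: starting from the dictionaries of a consistent pair set S, the loop
-- succeeds iff the accumulated distinct-pair set stays consistent, and then holds exactly it
theorem pvMainInv (ps : List (Int × Int)) :
    ∀ (S : List (Int × Int)), S.Nodup → (S.map Prod.fst).Nodup → (S.map Prod.snd).Nodup →
    ps.foldl pvGo (some (PySem.Dict.mk S, PySem.Dict.mk (S.map pvSwap))) =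
      (if ((ps.foldl PySem.Set.add S).map Prod.fst).Nodup ∧
          ((ps.foldl PySem.Set.add S).map Prod.snd).Nodup
       then some (PySem.Dict.mk (ps.foldl PySem.Set.add S),
                  PySem.Dict.mk ((ps.foldl PySem.Set.add S).map pvSwap))
       else none) := by
  induction ps with
  | nil =>
    intro S hS hf hs
    rw [List.foldl_nil, List.foldl_nil, if_pos ⟨hf, hs⟩]
  | cons p t ih =>
    intro S hS hf hs
    rw [List.foldl_cons, List.foldl_cons]
    by_cases hp : p ∈ S
    · have hadd : PySem.Set.add S p = S := by
        simp [PySem.Set.add, PySem.Set.contains, hp]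
      have hgo : pvGo (some (PySem.Dict.mk S, PySem.Dict.mk (S.map pvSwap))) p
          = some (PySem.Dict.mk S, PySem.Dict.mk (S.map pvSwap)) := by
        have hg1 : (PySem.Dict.mk S).getD p.1 0 = p.2 := pvGetD_mk hp hf
        have hg2 : (PySem.Dict.mk (S.map pvSwap)).getD p.2 0 = p.1 :=
          pvGetD_mk (List.mem_map.mpr ⟨p, hp, rfl⟩) (by rw [pvSwap_fst]; exact hs)
        have hi1 : (PySem.Dict.mk S).insert p.1 p.2 = PySem.Dict.mk S := pvInsert_mem hf hp
        have hi2 : (PySem.Dict.mk (S.map pvSwap)).insert p.2 p.1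
            = PySem.Dict.mk (S.map pvSwap) :=
          pvInsert_mem (by rw [pvSwap_fst]; exact hs) (p := pvSwap p)
            (List.mem_map.mpr ⟨p, hp, rfl⟩)
        simp [pvGo, hg1, hg2, hi1, hi2]
      rw [hgo, hadd, ih S hS hf hs]
    · have haddp : PySem.Set.add S p = S ++ [p] := by
        simp [PySem.Set.add, PySem.Set.contains, hp]
      by_cases h1 : p.1 ∈ S.map Prod.fst
      · -- conflict on the source color: A returns None, the pair set loses injectivity
        obtain ⟨q, hq, hq1⟩ := List.mem_map.mp h1
        have hne : q.2 ≠ p.2 := by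
          intro h
          exact hp (by rw [show p = q from Prod.ext hq1.symm h.symm]; exact hq)
        have hgo : pvGo (some (PySem.Dict.mk S, PySem.Dict.mk (S.map pvSwap))) p = none := by
          have hc1 : (PySem.Dict.mk S).contains p.1 = true := (pvContains_mk S p.1).mpr h1
          have hg1 : (PySem.Dict.mk S).getD p.1 0 = q.2 := pvGetD_mk (hq1 ▸ hq) hf
          simp [pvGo, hc1, hg1, hne]
        rw [hgo, pvGo_none, haddp, if_neg]
        rintro ⟨hfT, -⟩
        have hsub : ((S ++ [p]).map Prod.fst).Nodup :=
          hfT.sublist (((pvAdd_prefix t (S ++ [p])).sublist).map Prod.fst)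
        rw [List.map_append] at hsub
        obtain ⟨-, -, hdis⟩ := List.nodup_append.mp hsub
        exact hdis p.1 h1 p.1 (by simp) rfl
      · by_cases h2 : p.2 ∈ S.map Prod.snd
        · -- conflict on the destination color
          obtain ⟨q, hq, hq2⟩ := List.mem_map.mp h2
          have hne : q.1 ≠ p.1 := by
            intro h
            exact hp (by rw [show p = q from Prod.ext h.symm hq2.symm]; exact hq)
          have hgo : pvGo (some (PySem.Dict.mk S, PySem.Dict.mk (S.map pvSwap))) p = none := by
            have hc1 : (PySem.Dict.mk S).contains p.1 = false := pvContains_mk_false S p.1 h1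
            have hc2 : (PySem.Dict.mk (S.map pvSwap)).contains p.2 = true :=
              (pvContains_mk _ p.2).mpr (by rw [pvSwap_fst]; exact h2)
            have hg2 : (PySem.Dict.mk (S.map pvSwap)).getD p.2 0 = q.1 :=
              pvGetD_mk (List.mem_map.mpr ⟨q, hq, by simp [pvSwap, hq2]⟩)
                (by rw [pvSwap_fst]; exact hs)
            simp [pvGo, hc1, hc2, hg2, hne]
          rw [hgo, pvGo_none, haddp, if_neg]
          rintro ⟨-, hsT⟩
          have hsub : ((S ++ [p]).map Prod.snd).Nodup :=
            hsT.sublist (((pvAdd_prefix t (S ++ [p])).sublist).map Prod.snd)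
          rw [List.map_append] at hsub
          obtain ⟨-, -, hdis⟩ := List.nodup_append.mp hsub
          exact hdis p.2 h2 p.2 (by simp) rfl
        · -- genuinely new pair: both sides extend their state with it
          have hc1 : (PySem.Dict.mk S).contains p.1 = false := pvContains_mk_false S p.1 h1
          have hc2 : (PySem.Dict.mk (S.map pvSwap)).contains p.2 = false :=
            pvContains_mk_false _ p.2 (by rw [pvSwap_fst]; exact h2)
          have hgo : pvGo (some (PySem.Dict.mk S, PySem.Dict.mk (S.map pvSwap))) p
              = some (PySem.Dict.mk (S ++ [p]), PySem.Dict.mk ((S ++ [p]).map pvSwap)) := by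
            have hi1 := pvInsert_fresh S p h1
            have hi2 : (PySem.Dict.mk (S.map pvSwap)).insert p.2 p.1
                = PySem.Dict.mk ((S ++ [p]).map pvSwap) := by
              have h3 : (S ++ [p]).map pvSwap = S.map pvSwap ++ [pvSwap p] := by simp
              rw [h3]
              exact pvInsert_fresh (S.map pvSwap) (pvSwap p) (by rw [pvSwap_fst]; exact h2)
            simp [pvGo, hc1, hc2, hi1, hi2]
          have hS' : (S ++ [p]).Nodup := by
            rw [List.nodup_append]
            refine ⟨hS, List.nodup_singleton _, ?_⟩
            intro a ha b hb hab
            rw [List.mem_singleton] at hb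
            exact hp (hb ▸ hab ▸ ha)
          have hf' : ((S ++ [p]).map Prod.fst).Nodup := by
            rw [List.map_append, List.nodup_append]
            refine ⟨hf, List.nodup_singleton _, ?_⟩
            intro a ha b hb hab
            simp only [List.map_cons, List.map_nil, List.mem_singleton] at hb
            exact h1 (hb ▸ hab ▸ ha)
          have hs' : ((S ++ [p]).map Prod.snd).Nodup := by
            rw [List.map_append, List.nodup_append]
            refine ⟨hs, List.nodup_singleton _, ?_⟩
            intro a ha b hb hab
            simp only [List.map_cons, List.map_nil, List.mem_singleton] at hb
            exact h2 (hb ▸ hab ▸ ha)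
          rw [hgo, haddp, ih (S ++ [p]) hS' hf' hs']

-- dedup-length criterion for duplicate-freeness
theorem pvLenIff {α : Type} [BEq α] [LawfulBEq α] (l : List α) :
    (PySem.Set.ofList l).length = l.length ↔ l.Nodup := by
  have := pvFoldlAddLenIff l [] List.nodup_nil
  rw [show PySem.Set.ofList l = l.foldl PySem.Set.add [] from rfl]
  simpa using this

theorem pvItemsOfList (l : List (Int × Int)) (hl : (l.map Prod.fst).Nodup) :
    (PySem.Dict.ofList l).items = l := by
  rw [show PySem.Dict.ofList l = l.foldl (fun d p => d.insert p.1 p.2) PySem.Dict.empty from rfl]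
  rw [PySem.Dict.items_foldl_insert_fresh l Prod.fst Prod.snd PySem.Dict.empty (by simp) hl]
  show ([] : List (Int × Int)) ++ List.map (fun a => (a.1, a.2)) l = l
  simp

theorem pvNestA (src dst : List (List Int)) (h w : Int)
    (init : Option (PySem.Dict Int Int × PySem.Dict Int Int)) :
    (PySem.List.pyRange 0 h 1).foldl
      (fun st r => (PySem.List.pyRange 0 w 1).foldl
        (fun st c => pvGo st (pvCell src r c, pvCell dst r c)) st) init
    = (pvCells src dst h w).foldl pvGo init := by
  unfold pvCells
  rw [← pvFoldlFoldlFlatMap]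
  simp only [List.foldl_map]

theorem pvNestB (src dst : List (List Int)) (h w : Int) (init : PySem.Set (Int × Int)) :
    (PySem.List.pyRange 0 h 1).foldl
      (fun S r => (PySem.List.pyRange 0 w 1).foldl
        (fun S c => PySem.Set.add S (pvCell src r c, pvCell dst r c)) S) init
    = (pvCells src dst h w).foldl PySem.Set.add init := by
  unfold pvCells
  rw [← pvFoldlFoldlFlatMap]
  simp only [List.foldl_map]

theorem pvPortsEq (src dst : List (List Int)) :
    infer_bijective_palette_map src dst = infer_bijective_palette_map_alt src dst := by
  unfold infer_bijective_palette_map infer_bijective_palette_map_alt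
  by_cases hd : pvDims src ≠ pvDims dst
  · rw [if_pos hd, if_pos hd]
  · rw [if_neg hd, if_neg hd]
    dsimp only
    rw [pvNestA, pvNestB]
    rw [show (some (PySem.Dict.empty, PySem.Dict.empty)
          : Option (PySem.Dict Int Int × PySem.Dict Int Int))
        = some (PySem.Dict.mk [], PySem.Dict.mk (([] : List (Int × Int)).map pvSwap)) from rfl]
    rw [pvMainInv _ [] List.nodup_nil (by simp) (by simp)]
    rw [show (PySem.Set.empty : PySem.Set (Int × Int)) = [] from rfl]
    set T := (pvCells src dst (pvDims src).1 (pvDims src).2).foldl PySem.Set.add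
      ([] : List (Int × Int)) with hT
    by_cases hg : (T.map Prod.fst).Nodup ∧ (T.map Prod.snd).Nodup
    · rw [if_pos hg]
      have hb1 : (PySem.Set.ofList (T.map Prod.fst)).length = T.length := by
        rw [(pvLenIff _).mpr hg.1, List.length_map]
      have hb2 : (PySem.Set.ofList (T.map Prod.snd)).length = T.length := by
        rw [(pvLenIff _).mpr hg.2, List.length_map]
      rw [if_neg (by simp [hb1, hb2]), pvItemsOfList T hg.1]
    · rw [if_neg hg]
      have hlen : (PySem.Set.ofList (T.map Prod.fst)).length ≠ T.length ∨
          (PySem.Set.ofList (T.map Prod.snd)).length ≠ T.length := by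
        rcases not_and_or.mp hg with h | h
        · left
          intro heq
          exact h ((pvLenIff _).mp (by rw [List.length_map]; exact heq))
        · right
          intro heq
          exact h ((pvLenIff _).mp (by rw [List.length_map]; exact heq))
      rw [if_pos hlen]

-- ===== VERDICT (by name: the statement is the Claim_ definition above) =====
theorem infer_bijective_palette_map_spec : Claim_equal_infer_bijective_palette_map := by
  intro src dst _ _
  unfold Spec_infer_bijective_palette_map
  exact pvPortsEq src dst
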